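-- pv_equiv track=rewrite | github.com/Lakshmikalyani348/Sahaayak-AI-Mental-Health-Companion-final-yearproject | backend/safety.py | is_harmful
-- ===== SOURCE A (Python) =====
-- def is_harmful(text):
--     """
--     Detects harmful or suicidal words in the text.
--     Returns True if harmful, False otherwise.
--     """
--     harmful_words = [
--         "suicide", "kill myself", "die", "harm myself", "end my life",
--         "don't want to live", "better off dead", "cutting myself", "self-harm",
--         "want to disappear", "hurt myself", "take my life", "jump off",
--         "pill overdose", "never wake up", "give up on life", "no point in living"
--     ]
--
--     text = text.lower()
--     for word in harmful_words:
--         if word in text: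
--             return True
--     return False
-- ===== SOURCE B (Python) =====
-- HARMFUL_WORDS = [
--     "suicide", "kill myself", "die", "harm myself", "end my life",
--     "don't want to live", "better off dead", "cutting myself", "self-harm",
--     "want to disappear", "hurt myself", "take my life", "jump off",
--     "pill overdose", "never wake up", "give up on life", "no point in living"
-- ]
--
--
-- def is_harmful(text):
--     """Single left-to-right scan: at each position of the lowercased text,
--     test whether any harmful phrase starts there."""
--     t = text.lower()
--     return any(
--         any(t.startswith(w, i) for w in HARMFUL_WORDS)
--         for i in range(len(t) + 1)
--     )
-- ===== Notes on version B (the rewrite author's own statement) =====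
-- stated objective: alternative
-- what changed: Replaces A's phrase-major loop of `word in text` substring tests with a position-major single left-to-right scan that at each index of the lowercased text checks whether any phrase starts there via str.startswith.
import Mathlib
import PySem

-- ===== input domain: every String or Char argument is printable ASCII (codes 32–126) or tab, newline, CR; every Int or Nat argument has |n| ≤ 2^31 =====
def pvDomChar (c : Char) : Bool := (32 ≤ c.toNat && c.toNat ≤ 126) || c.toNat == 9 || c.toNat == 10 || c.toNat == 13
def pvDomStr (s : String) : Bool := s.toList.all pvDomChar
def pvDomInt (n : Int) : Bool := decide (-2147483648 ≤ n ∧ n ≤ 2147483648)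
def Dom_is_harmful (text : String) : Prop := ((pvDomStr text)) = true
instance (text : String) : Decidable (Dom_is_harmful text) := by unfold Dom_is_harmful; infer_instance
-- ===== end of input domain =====

-- B replaces A's phrase-major `word in text` loop by a position-major scan
-- (at each index of the lowercased text, does some phrase start here?); alternative, same cost.


-- the literal phrase list shared by both sources
def pvHarmfulWords : List String :=
  ["suicide", "kill myself", "die", "harm myself", "end my life",
   "don't want to live", "better off dead", "cutting myself", "self-harm",
   "want to disappear", "hurt myself", "take my life", "jump off",
   "pill overdose", "never wake up", "give up on life", "no point in living"]

-- ===== PORT A =====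
-- the `for word in harmful_words: if word in text: return True` loop
def pvLoopA (ws : List String) (t : String) : Bool :=
  match ws with
  | [] => false
  | w :: rest => if PySem.Str.isIn w t then true else pvLoopA rest t

def is_harmful (text : String) : Bool :=
  pvLoopA pvHarmfulWords (PySem.Str.lower text)

-- ===== PORT B =====
-- any over range(len(t)+1) of: any phrase starts at position i (t.startswith(w, i))
def is_harmful_alt (text : String) : Bool :=
  let t := (PySem.Str.lower text).toList
  (List.range (t.length + 1)).any fun i =>
    pvHarmfulWords.any fun w => PySem.Chars.startswith (t.drop i) w.toList

-- ===== PRECONDITION & SPEC =====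
def Spec_is_harmful (text : String) (out : Bool) : Prop := out = is_harmful_alt text
instance (text : String) (out : Bool) : Decidable (Spec_is_harmful text out) := by unfold Spec_is_harmful; infer_instance

-- ===== CLAIM (what is proved, stated in full; the proofs are below) =====
def Claim_equal_is_harmful : Prop := ∀ (text : String), Dom_is_harmful text → Spec_is_harmful text (is_harmful text)

-- ===== LEMMAS AND PROOFS =====

theorem pvLoopA_eq_any (ws : List String) (t : String) :
    pvLoopA ws t = ws.any (fun w => PySem.Str.isIn w t) := by
  induction ws with
  | nil => rfl
  | cons w rest ih => simp only [pvLoopA, ih, List.any_cons]; split_ifs <;> simp_all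

theorem pvIsIn_eq_scan (w t : List Char) :
    PySem.Chars.isIn w t
      = (List.range (t.length + 1)).any (fun i => PySem.Chars.startswith (t.drop i) w) := by
  rw [Bool.eq_iff_iff]
  simp only [PySem.Chars.isIn_iff_infix, List.any_eq_true, List.mem_range,
    PySem.Chars.startswith, List.isPrefixOf_iff_prefix]
  constructor
  · rintro ⟨s, u, rfl⟩
    exact ⟨s.length, by simp, by simp⟩
  · rintro ⟨i, _, u, hu⟩
    exact ⟨t.take i, u, by rw [List.append_assoc, hu, List.take_append_drop]⟩

theorem is_harmful_spec : Claim_equal_is_harmful := by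
  intro text _
  unfold Spec_is_harmful is_harmful is_harmful_alt
  rw [pvLoopA_eq_any, Bool.eq_iff_iff]
  simp only [List.any_eq_true, PySem.Str.isIn_eq, pvIsIn_eq_scan]
  constructor
  · rintro ⟨w, hw, i, hi, h⟩; exact ⟨i, hi, w, hw, h⟩
  · rintro ⟨i, hi, w, hw, h⟩; exact ⟨w, hw, i, hi, h⟩
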